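-- pv_equiv track=rewrite | github.com/tahorst/wcm-user | metabolic-network/find_valid_connections.py | trace_possible_reactions
-- ===== SOURCE A (Python) =====
-- def trace_possible_reactions(start, met_to_rxn, rxn_to_met, excluded_rxns):
-- 	# type: (Set[str], Dict[str, List[str]], Dict[str, List[str]], Set[str]) -> Set[str]
-- 	"""
-- 	Iteratively trace metabolites through valid reactions.
--
-- 	Args:
-- 		start: starting set of metabolites (sources or sinks)
-- 		met_to_rxn: mapping of metabolites to reactions
-- 		rxn_to_met: mapping of reactions to metabolites
-- 		excluded_rxns: invalid reactions that will not link to new metabolites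
--
-- 	Returns:
-- 		mets: set of metabolites that can be traced from start through valid
-- 			reactions (source -> product or reactant -> sink)
-- 	"""
--
-- 	mets = set()
-- 	rxns = set(excluded_rxns)
--
-- 	new_mets = set(start)
-- 	while new_mets:
-- 		# Get reactions that have a source metabolite as an input
-- 		possible_rxns = set()
-- 		for met in new_mets:
-- 			possible_rxns.update({r for r in met_to_rxn.get(met, [])})
-- 		new_rxns = possible_rxns.difference(rxns)
--
-- 		# Get products from reactions with sources
-- 		possible_mets = set()
-- 		for rxn in new_rxns:
-- 			possible_mets.update({m for m in rxn_to_met.get(rxn, [])})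
--
-- 		# Update metabolites for the next round
-- 		mets.update(new_mets)
-- 		new_mets = possible_mets.difference(mets)
--
-- 	return mets
-- ===== SOURCE B (Python) =====
-- def trace_possible_reactions(start, met_to_rxn, rxn_to_met, excluded_rxns):
-- 	"""Self-queueing worklist scan: the discovery list doubles as its own queue
-- 	(an index cursor dequeues one metabolite at a time), each reaction fires at
-- 	most once, and products are recorded the instant they are first seen -- no
-- 	rounds, no frontier, no set unions/differences."""
-- 	seen = set()
-- 	order = []
-- 	for m in start:
-- 		if m not in seen:
-- 			seen.add(m)
-- 			order.append(m)
-- 	fired = set(excluded_rxns)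
-- 	i = 0
-- 	while i < len(order):
-- 		for rxn in met_to_rxn.get(order[i], []):
-- 			if rxn not in fired:
-- 				fired.add(rxn)
-- 				for m in rxn_to_met.get(rxn, []):
-- 					if m not in seen:
-- 						seen.add(m)
-- 						order.append(m)
-- 		i += 1
-- 	return seen
-- ===== Notes on version B (the rewrite author's own statement) =====
-- stated objective: alternative
-- what changed: A runs level-synchronous rounds of set algebra (union all frontier reactions, two set differences per round, reactions re-derived every round); B has no rounds or frontiers at all: the discovery list doubles as its own queue, an index cursor dequeues one metabolite at a time, each reaction fires at most once, and each product is recorded the instant it is first seen.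
import Mathlib
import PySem

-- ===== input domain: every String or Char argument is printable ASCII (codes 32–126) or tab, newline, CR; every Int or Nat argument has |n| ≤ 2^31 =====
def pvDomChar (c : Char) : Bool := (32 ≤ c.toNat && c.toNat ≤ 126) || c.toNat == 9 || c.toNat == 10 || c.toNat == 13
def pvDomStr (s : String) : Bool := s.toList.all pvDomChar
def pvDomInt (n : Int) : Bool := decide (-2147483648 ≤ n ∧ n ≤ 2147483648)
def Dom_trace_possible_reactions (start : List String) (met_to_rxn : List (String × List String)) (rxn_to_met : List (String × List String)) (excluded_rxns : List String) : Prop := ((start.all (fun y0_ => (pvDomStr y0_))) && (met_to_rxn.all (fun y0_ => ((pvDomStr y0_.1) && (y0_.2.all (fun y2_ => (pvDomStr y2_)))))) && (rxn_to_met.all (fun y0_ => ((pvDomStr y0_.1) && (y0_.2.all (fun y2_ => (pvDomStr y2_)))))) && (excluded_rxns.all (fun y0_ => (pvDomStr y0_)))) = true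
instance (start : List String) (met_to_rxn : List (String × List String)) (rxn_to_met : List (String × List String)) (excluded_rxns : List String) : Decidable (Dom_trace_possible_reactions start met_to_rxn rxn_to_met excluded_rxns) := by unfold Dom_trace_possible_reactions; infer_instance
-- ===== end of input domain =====

-- B replaces A's round-based set algebra (per-round unions and two set differences, reactions
-- re-derived every round) by a self-queueing worklist scan: the discovery list is its own queue,
-- an index cursor dequeues one metabolite at a time, each reaction fires at most once.

-- ===== PORT A =====
-- A's 'while new_mets' loop; the fuel only makes the recursion structural and is large enough
-- that it is never exhausted (each non-final round adds at least one metabolite, all of which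
-- come from 'start' or from the products stored in rxn_to_met).
def pvLoopA (mtr rtm : PySem.Dict String (List String)) (rxns : PySem.Set String) :
    Nat → PySem.Set String → PySem.Set String → PySem.Set String
  | 0, mets, _ => mets
  | fuel + 1, mets, newMets =>
    if newMets = [] then mets
    else
      let possibleRxns := newMets.foldl
        (fun s met => PySem.Set.update s (PySem.Set.ofList (mtr.getD met []))) PySem.Set.empty
      let newRxns := PySem.Set.diff possibleRxns rxns
      let possibleMets := newRxns.foldl
        (fun s rxn => PySem.Set.update s (PySem.Set.ofList (rtm.getD rxn []))) PySem.Set.empty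
      let mets' := PySem.Set.update mets newMets
      pvLoopA mtr rtm rxns fuel mets' (PySem.Set.diff possibleMets mets')

def trace_possible_reactions (start : List String) (met_to_rxn : List (String × List String)) (rxn_to_met : List (String × List String)) (excluded_rxns : List String) : List String :=
  let mtr := PySem.Dict.ofList met_to_rxn
  let rtm := PySem.Dict.ofList rxn_to_met
  let rxns := PySem.Set.ofList excluded_rxns
  let fuel := start.length + rtm.values.flatten.length + 1
  pvLoopA mtr rtm rxns fuel PySem.Set.empty (PySem.Set.ofList start)

-- ===== PORT B =====
-- state of B's scan: (seen, order, fired); 'order' is the discovery list that doubles as queue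
def pvBProd (st : PySem.Set String × List String × PySem.Set String) (m : String) :
    PySem.Set String × List String × PySem.Set String :=
  if m ∈ st.1 then st else (PySem.Set.add st.1 m, st.2.1 ++ [m], st.2.2)

def pvBRxn (rtm : PySem.Dict String (List String))
    (st : PySem.Set String × List String × PySem.Set String) (rxn : String) :
    PySem.Set String × List String × PySem.Set String :=
  if rxn ∈ st.2.2 then st
  else (rtm.getD rxn []).foldl pvBProd (st.1, st.2.1, PySem.Set.add st.2.2 rxn)

-- B's 'while i < len(order)' loop; fuel is an upper bound on the final length of 'order',
-- so it is never exhausted.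
def pvBLoop (mtr rtm : PySem.Dict String (List String)) :
    Nat → (PySem.Set String × List String × PySem.Set String) → Nat → PySem.Set String
  | 0, st, _ => st.1
  | fuel + 1, st, i =>
    if h : i < st.2.1.length then
      pvBLoop mtr rtm fuel ((mtr.getD st.2.1[i] []).foldl (pvBRxn rtm) st) (i + 1)
    else st.1

def trace_possible_reactions_alt (start : List String) (met_to_rxn : List (String × List String)) (rxn_to_met : List (String × List String)) (excluded_rxns : List String) : List String :=
  let mtr := PySem.Dict.ofList met_to_rxn
  let rtm := PySem.Dict.ofList rxn_to_met
  let init := start.foldl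
    (fun st m => if m ∈ st.1 then st else (PySem.Set.add st.1 m, st.2 ++ [m]))
    ((PySem.Set.empty : PySem.Set String), ([] : List String))
  let fuel := start.length + rtm.values.flatten.length + 1
  pvBLoop mtr rtm fuel (init.1, init.2, PySem.Set.ofList excluded_rxns) 0

-- ===== PRECONDITION & SPEC =====
def Spec_trace_possible_reactions (start : List String) (met_to_rxn : List (String × List String)) (rxn_to_met : List (String × List String)) (excluded_rxns : List String) (out : List String) : Prop := out = trace_possible_reactions_alt start met_to_rxn rxn_to_met excluded_rxns
instance (start : List String) (met_to_rxn : List (String × List String)) (rxn_to_met : List (String × List String)) (excluded_rxns : List String) (out : List String) : Decidable (Spec_trace_possible_reactions start met_to_rxn rxn_to_met excluded_rxns out) := by unfold Spec_trace_possible_reactions; infer_instance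

-- ===== CLAIM (what is proved, stated in full; the proofs are below) =====
def Claim_equal_trace_possible_reactions : Prop := ∀ (start : List String) (met_to_rxn : List (String × List String)) (rxn_to_met : List (String × List String)) (excluded_rxns : List String), Dom_trace_possible_reactions start met_to_rxn rxn_to_met excluded_rxns → Spec_trace_possible_reactions start met_to_rxn rxn_to_met excluded_rxns (trace_possible_reactions start met_to_rxn rxn_to_met excluded_rxns)

-- ===== LEMMAS AND PROOFS =====

-- proof-side mirror of B's per-metabolite work with the discovery list abstracted to a
-- 'newly appended' component: state (mets, fired, next)
def pvStepM (st : PySem.Set String × PySem.Set String × List String) (m : String) :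
    PySem.Set String × PySem.Set String × List String :=
  if m ∈ st.1 then st else (PySem.Set.add st.1 m, st.2.1, st.2.2 ++ [m])

def pvStepR (rtm : PySem.Dict String (List String))
    (st : PySem.Set String × PySem.Set String × List String) (rxn : String) :
    PySem.Set String × PySem.Set String × List String :=
  if rxn ∈ st.2.1 then st
  else (rtm.getD rxn []).foldl pvStepM (st.1, PySem.Set.add st.2.1 rxn, st.2.2)

def pvStepMet (mtr rtm : PySem.Dict String (List String))
    (st : PySem.Set String × PySem.Set String × List String) (met : String) :
    PySem.Set String × PySem.Set String × List String :=
  (mtr.getD met []).foldl (pvStepR rtm) st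

-- proof-side pending-list form of B's loop: process the head, append its discoveries
def pvLoopP (mtr rtm : PySem.Dict String (List String)) :
    Nat → PySem.Set String → PySem.Set String → List String → PySem.Set String
  | 0, seen, _, _ => seen
  | _ + 1, seen, _, [] => seen
  | fuel + 1, seen, fired, met :: P =>
    let σ := pvStepMet mtr rtm (seen, fired, []) met
    pvLoopP mtr rtm fuel σ.1 σ.2.1 (P ++ σ.2.2)

-- Python set.difference, with the membership test written with 'decide'
lemma pv_diff_eq (s t : List String) :
    PySem.Set.diff s t = s.filter (fun y => !decide (y ∈ t)) := by
  simp [PySem.Set.diff, PySem.Set.contains_eq_listContains, List.contains_eq_mem]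

-- updating with a deduplicated list updates with the list itself
lemma pv_update_ofList (xs : List String) :
    ∀ s : PySem.Set String, PySem.Set.update s (PySem.Set.ofList xs) = PySem.Set.update s xs := by
  induction xs using List.reverseRecOn with
  | nil => intro s; rfl
  | append_singleton xs x ih =>
    intro s
    rw [PySem.Set.ofList_append_singleton,
      show PySem.Set.update s (xs ++ [x]) = (PySem.Set.update s xs).add x by
        rw [PySem.Set.update_append]; rfl]
    by_cases hx : x ∈ PySem.Set.ofList xs
    · have hx' : x ∈ PySem.Set.update s xs := by
        rw [PySem.Set.mem_update]
        exact Or.inr (by simpa [PySem.Set.mem_ofList] using hx)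
      rw [PySem.Set.add_of_mem hx, ih, PySem.Set.add_of_mem hx']
    · rw [PySem.Set.add_of_not_mem hx, PySem.Set.update_append, ih]
      rfl

-- a union-accumulating loop is one big update
lemma pv_foldl_update (g : String → List String) (F : List String) :
    ∀ s : PySem.Set String,
      F.foldl (fun s a => PySem.Set.update s (g a)) s = PySem.Set.update s (F.flatMap g) := by
  induction F with
  | nil => intro s; rfl
  | cons a F ih =>
    intro s
    rw [List.foldl_cons, List.flatMap_cons, PySem.Set.update_append, ih]

-- A's per-round union loop over dict lookups
lemma pv_fold_ofList (d : PySem.Dict String (List String)) (X : List String) :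
    X.foldl (fun s k => PySem.Set.update s (PySem.Set.ofList (d.getD k []))) PySem.Set.empty
      = PySem.Set.ofList (X.flatMap fun k => d.getD k []) := by
  rw [PySem.List.foldl_congr_mem X _ (fun s k => PySem.Set.update s (d.getD k []))
    PySem.Set.empty (fun acc x _ => pv_update_ofList _ acc)]
  rw [pv_foldl_update]
  rfl

-- 'discard then filter by A' is 'filter by A ++ [x]'
lemma pv_filter_discard (s : List String) (x : String) (A : List String) :
    (PySem.Set.discard s x).filter (fun y => !decide (y ∈ A))
      = s.filter (fun y => !decide (y ∈ A ++ [x])) := by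
  simp only [PySem.Set.discard, List.filter_filter]
  apply List.filter_congr
  intro y _
  by_cases hyx : y = x <;> simp [hyx, List.mem_append]

lemma pv_filter_cons_mem (s : List String) (x : String) (A : List String) (hx : x ∈ A) :
    (PySem.Set.ofList (x :: s)).filter (fun y => !decide (y ∈ A))
      = (PySem.Set.ofList s).filter (fun y => !decide (y ∈ A)) := by
  rw [PySem.Set.ofList_cons, List.filter_cons_of_neg (by simp [hx]), pv_filter_discard]
  apply List.filter_congr
  intro y _
  by_cases hyx : y = x <;> simp [hyx, hx, List.mem_append]

lemma pv_filter_cons_not_mem (s : List String) (x : String) (A : List String) (hx : x ∉ A) :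
    (PySem.Set.ofList (x :: s)).filter (fun y => !decide (y ∈ A))
      = x :: (PySem.Set.ofList s).filter (fun y => !decide (y ∈ A ++ [x])) := by
  rw [PySem.Set.ofList_cons, List.filter_cons_of_pos (by simp [hx]), pv_filter_discard]

-- splitting the 'new elements in first-appearance order' of a concatenation
lemma pv_chunk (A B C : List String) :
    (PySem.Set.ofList (A ++ B)).filter (fun y => !decide (y ∈ C))
      = (PySem.Set.ofList A).filter (fun y => !decide (y ∈ C))
        ++ (PySem.Set.ofList B).filter (fun y => !decide (y ∈ PySem.Set.update C A)) := by
  rw [PySem.Set.ofList_append, PySem.Set.update_eq_append_filter, List.filter_append]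
  congr 1
  rw [List.filter_filter]
  apply List.filter_congr
  intro y _
  by_cases h1 : y ∈ C <;> by_cases h2 : y ∈ A <;>
    simp [h1, h2, PySem.Set.mem_update, PySem.Set.mem_ofList,
      PySem.Set.contains_eq_listContains, List.contains_eq_mem]

-- the innermost product loop, abstract form
lemma pvProdFold (L : List String) :
    ∀ (mets seen : PySem.Set String) (next : List String),
      L.foldl pvStepM (mets, seen, next)
        = (PySem.Set.update mets L, seen,
           next ++ (PySem.Set.ofList L).filter (fun m => !decide (m ∈ mets))) := by
  induction L with
  | nil =>
    intro mets seen next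
    simp [PySem.Set.update_nil, PySem.Set.ofList, PySem.Set.empty]
  | cons m L ih =>
    intro mets seen next
    rw [List.foldl_cons]
    by_cases hm : m ∈ mets
    · rw [show pvStepM (mets, seen, next) m = (mets, seen, next) by simp [pvStepM, hm]]
      rw [ih, PySem.Set.update_cons, PySem.Set.add_of_mem hm, pv_filter_cons_mem _ _ _ hm]
    · rw [show pvStepM (mets, seen, next) m = (mets ++ [m], seen, next ++ [m]) by
        simp [pvStepM, hm]]
      rw [ih, PySem.Set.update_cons, PySem.Set.add_of_not_mem hm, pv_filter_cons_not_mem _ _ _ hm]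
      simp [List.append_assoc]

-- the reaction loop over one metabolite's reaction list, abstract form
lemma pvRxnFold (rtm : PySem.Dict String (List String)) (Rl : List String) :
    ∀ (mets seen : PySem.Set String) (next : List String),
      Rl.foldl (pvStepR rtm) (mets, seen, next)
        = (PySem.Set.update mets
             (((PySem.Set.ofList Rl).filter (fun r => !decide (r ∈ seen))).flatMap
               (fun r => rtm.getD r [])),
           PySem.Set.update seen Rl,
           next ++ (PySem.Set.ofList
             (((PySem.Set.ofList Rl).filter (fun r => !decide (r ∈ seen))).flatMap
               (fun r => rtm.getD r []))).filter (fun m => !decide (m ∈ mets))) := by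
  induction Rl with
  | nil =>
    intro mets seen next
    simp [PySem.Set.update_nil, PySem.Set.ofList, PySem.Set.empty]
  | cons r Rl ih =>
    intro mets seen next
    rw [List.foldl_cons]
    by_cases hr : r ∈ seen
    · rw [show pvStepR rtm (mets, seen, next) r = (mets, seen, next) by simp [pvStepR, hr]]
      rw [ih, PySem.Set.update_cons, PySem.Set.add_of_mem hr, pv_filter_cons_mem _ _ _ hr]
    · rw [show pvStepR rtm (mets, seen, next) r
          = (rtm.getD r []).foldl pvStepM (mets, PySem.Set.add seen r, next) by
        simp [pvStepR, hr]]
      rw [PySem.Set.add_of_not_mem hr, pvProdFold, ih,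
        PySem.Set.update_cons, PySem.Set.add_of_not_mem hr, pv_filter_cons_not_mem _ _ _ hr,
        List.flatMap_cons, PySem.Set.update_append, pv_chunk]
      simp [List.append_assoc]

-- a whole pass over a list of metabolites, abstract form
lemma pvFrontFold (mtr rtm : PySem.Dict String (List String)) (F : List String) :
    ∀ (mets seen : PySem.Set String) (next : List String),
      F.foldl (pvStepMet mtr rtm) (mets, seen, next)
        = (PySem.Set.update mets
             (((PySem.Set.ofList (F.flatMap (fun met => mtr.getD met []))).filter
                 (fun r => !decide (r ∈ seen))).flatMap (fun r => rtm.getD r [])),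
           PySem.Set.update seen (F.flatMap (fun met => mtr.getD met [])),
           next ++ (PySem.Set.ofList
             (((PySem.Set.ofList (F.flatMap (fun met => mtr.getD met []))).filter
                 (fun r => !decide (r ∈ seen))).flatMap (fun r => rtm.getD r []))).filter
             (fun m => !decide (m ∈ mets))) := by
  induction F with
  | nil =>
    intro mets seen next
    simp [PySem.Set.update_nil, PySem.Set.ofList, PySem.Set.empty]
  | cons met F ih =>
    intro mets seen next
    rw [List.foldl_cons,
      show pvStepMet mtr rtm (mets, seen, next) met
        = (mtr.getD met []).foldl (pvStepR rtm) (mets, seen, next) from rfl]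
    rw [pvRxnFold, ih, List.flatMap_cons (f := fun met => mtr.getD met []), pv_chunk,
      List.flatMap_append, PySem.Set.update_append, PySem.Set.update_append, pv_chunk]
    simp [List.append_assoc]

-- next-accumulator shift for the abstract product fold
lemma pvStepM_shift (L : List String) (s f : PySem.Set String) (n : List String) :
    L.foldl pvStepM (s, f, n)
      = ((L.foldl pvStepM (s, f, [])).1, (L.foldl pvStepM (s, f, [])).2.1,
         n ++ (L.foldl pvStepM (s, f, [])).2.2) := by
  rw [pvProdFold, pvProdFold]
  simp

-- next-accumulator shift for the abstract reaction fold
lemma pvStepR_shift (rtm : PySem.Dict String (List String)) (L : List String)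
    (s f : PySem.Set String) (n : List String) :
    L.foldl (pvStepR rtm) (s, f, n)
      = ((L.foldl (pvStepR rtm) (s, f, [])).1, (L.foldl (pvStepR rtm) (s, f, [])).2.1,
         n ++ (L.foldl (pvStepR rtm) (s, f, [])).2.2) := by
  rw [pvRxnFold, pvRxnFold]
  simp

-- B's concrete per-product loop equals the abstract one with the discovery list threaded through
lemma pvBProdFold (L : List String) :
    ∀ (seen : PySem.Set String) (ord : List String) (fired : PySem.Set String),
      L.foldl pvBProd (seen, ord, fired)
        = ((L.foldl pvStepM (seen, fired, [])).1,
           ord ++ (L.foldl pvStepM (seen, fired, [])).2.2,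
           (L.foldl pvStepM (seen, fired, [])).2.1) := by
  induction L with
  | nil => intro seen ord fired; simp
  | cons m L ih =>
    intro seen ord fired
    rw [List.foldl_cons, List.foldl_cons]
    by_cases hm : m ∈ seen
    · rw [show pvBProd (seen, ord, fired) m = (seen, ord, fired) by simp [pvBProd, hm],
        show pvStepM (seen, fired, ([] : List String)) m = (seen, fired, []) by
          simp [pvStepM, hm]]
      exact ih seen ord fired
    · rw [show pvBProd (seen, ord, fired) m
          = (PySem.Set.add seen m, ord ++ [m], fired) by simp [pvBProd, hm],
        show pvStepM (seen, fired, ([] : List String)) m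
          = (PySem.Set.add seen m, fired, [m]) by simp [pvStepM, hm]]
      rw [ih, pvStepM_shift (s := PySem.Set.add seen m) (f := fired) (n := [m])]
      simp [List.append_assoc]

-- same for B's per-reaction loop
lemma pvBRxnFold (rtm : PySem.Dict String (List String)) (Rl : List String) :
    ∀ (seen : PySem.Set String) (ord : List String) (fired : PySem.Set String),
      Rl.foldl (pvBRxn rtm) (seen, ord, fired)
        = ((Rl.foldl (pvStepR rtm) (seen, fired, [])).1,
           ord ++ (Rl.foldl (pvStepR rtm) (seen, fired, [])).2.2,
           (Rl.foldl (pvStepR rtm) (seen, fired, [])).2.1) := by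
  induction Rl with
  | nil => intro seen ord fired; simp
  | cons r Rl ih =>
    intro seen ord fired
    rw [List.foldl_cons, List.foldl_cons]
    by_cases hr : r ∈ fired
    · rw [show pvBRxn rtm (seen, ord, fired) r = (seen, ord, fired) by simp [pvBRxn, hr],
        show pvStepR rtm (seen, fired, ([] : List String)) r = (seen, fired, []) by
          simp [pvStepR, hr]]
      exact ih seen ord fired
    · rw [show pvBRxn rtm (seen, ord, fired) r
          = (rtm.getD r []).foldl pvBProd (seen, ord, PySem.Set.add fired r) by
        simp [pvBRxn, hr],
        show pvStepR rtm (seen, fired, ([] : List String)) r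
          = (rtm.getD r []).foldl pvStepM (seen, PySem.Set.add fired r, []) by
        simp [pvStepR, hr]]
      rw [pvBProdFold]
      set σ := (rtm.getD r []).foldl pvStepM (seen, PySem.Set.add fired r, []) with hσ
      rw [ih σ.1 (ord ++ σ.2.2) σ.2.1,
        show σ = (σ.1, σ.2.1, σ.2.2) from rfl,
        pvStepR_shift rtm Rl σ.1 σ.2.1 σ.2.2]
      simp [List.append_assoc]

-- B's index loop equals the pending-list loop
lemma pvBLoop_eq_P (mtr rtm : PySem.Dict String (List String)) :
    ∀ (fuel : Nat) (done P : List String) (seen fired : PySem.Set String),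
      pvBLoop mtr rtm fuel (seen, done ++ P, fired) done.length
        = pvLoopP mtr rtm fuel seen fired P := by
  intro fuel
  induction fuel with
  | zero => intro done P seen fired; cases P <;> rfl
  | succ fuel ih =>
    intro done P seen fired
    cases P with
    | nil =>
      simp [pvBLoop, pvLoopP]
    | cons met P' =>
      have hlen : done.length < (done ++ met :: P').length := by
        simp
      rw [show pvBLoop mtr rtm (fuel + 1) (seen, done ++ met :: P', fired) done.length
          = pvBLoop mtr rtm fuel
              ((mtr.getD (done ++ met :: P')[done.length] []).foldl (pvBRxn rtm)
                (seen, done ++ met :: P', fired)) (done.length + 1) by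
        simp [pvBLoop]]
      have hget : (done ++ met :: P')[done.length]'hlen = met := by
        rw [List.getElem_append_right (Nat.le_refl _)]
        simp
      rw [hget, pvBRxnFold]
      set σ := (mtr.getD met []).foldl (pvStepR rtm) (seen, fired, ([] : List String)) with hσ
      have hσ' : σ = pvStepMet mtr rtm (seen, fired, []) met := rfl
      have hre : (done ++ met :: P') ++ σ.2.2 = (done ++ [met]) ++ (P' ++ σ.2.2) := by
        simp
      have hlen1 : done.length + 1 = (done ++ [met]).length := by simp
      rw [hre, hlen1, ih (done ++ [met]) (P' ++ σ.2.2) σ.1 σ.2.1]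
      simp only [pvLoopP]
      rw [← hσ']

-- the next-accumulator of a pass only shifts: fold from (s,f,n) = fold from (s,f,[]) prefixed by n
lemma pv_shift (mtr rtm : PySem.Dict String (List String)) (F : List String)
    (s f : PySem.Set String) (n : List String) :
    F.foldl (pvStepMet mtr rtm) (s, f, n)
      = ((F.foldl (pvStepMet mtr rtm) (s, f, [])).1,
         (F.foldl (pvStepMet mtr rtm) (s, f, [])).2.1,
         n ++ (F.foldl (pvStepMet mtr rtm) (s, f, [])).2.2) := by
  rw [pvFrontFold, pvFrontFold]
  simp

-- processing a chunk F of the pending list one metabolite at a time is one pass over F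
lemma pvLoopP_chunk (mtr rtm : PySem.Dict String (List String)) (F : List String) :
    ∀ (D : List String) (fuel : Nat) (seen fired : PySem.Set String),
      pvLoopP mtr rtm (F.length + fuel) seen fired (F ++ D)
        = pvLoopP mtr rtm fuel (F.foldl (pvStepMet mtr rtm) (seen, fired, [])).1
            (F.foldl (pvStepMet mtr rtm) (seen, fired, [])).2.1
            (D ++ (F.foldl (pvStepMet mtr rtm) (seen, fired, [])).2.2) := by
  induction F with
  | nil => intro D fuel seen fired; simp
  | cons met F' ih =>
    intro D fuel seen fired
    have : (met :: F').length + fuel = (F'.length + fuel) + 1 := by simp; omega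
    rw [this]
    rw [show pvLoopP mtr rtm ((F'.length + fuel) + 1) seen fired ((met :: F') ++ D)
        = pvLoopP mtr rtm (F'.length + fuel)
            (pvStepMet mtr rtm (seen, fired, []) met).1
            (pvStepMet mtr rtm (seen, fired, []) met).2.1
            ((F' ++ D) ++ (pvStepMet mtr rtm (seen, fired, []) met).2.2) from rfl]
    set σ := pvStepMet mtr rtm (seen, fired, []) met with hσ
    have hre : (F' ++ D) ++ σ.2.2 = F' ++ (D ++ σ.2.2) := by simp
    rw [hre, ih (D ++ σ.2.2) fuel σ.1 σ.2.1]
    have hfold : (met :: F').foldl (pvStepMet mtr rtm) (seen, fired, [])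
        = ((F'.foldl (pvStepMet mtr rtm) (σ.1, σ.2.1, [])).1,
           (F'.foldl (pvStepMet mtr rtm) (σ.1, σ.2.1, [])).2.1,
           σ.2.2 ++ (F'.foldl (pvStepMet mtr rtm) (σ.1, σ.2.1, [])).2.2) := by
      rw [List.foldl_cons, ← hσ]
      rw [show σ = (σ.1, σ.2.1, σ.2.2) from rfl, pv_shift]
    rw [hfold]
    simp [List.append_assoc]

-- reactions whose products are all known contribute nothing new
lemma pv_drop (rtm : PySem.Dict String (List String)) (proc : List String) (q : String → Bool) :
    ∀ C : List String,
      (∀ r ∈ proc, q r = false → ∀ m ∈ rtm.getD r [], m ∈ C) →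
      (PySem.Set.ofList (proc.flatMap (fun r => rtm.getD r []))).filter
          (fun m => !decide (m ∈ C))
        = (PySem.Set.ofList ((proc.filter q).flatMap (fun r => rtm.getD r []))).filter
          (fun m => !decide (m ∈ C)) := by
  induction proc with
  | nil => intro C _; rfl
  | cons r proc ih =>
    intro C h
    rw [List.flatMap_cons, pv_chunk]
    by_cases hq : q r = true
    · rw [List.filter_cons_of_pos hq, List.flatMap_cons, pv_chunk]
      congr 1
      exact ih (PySem.Set.update C (rtm.getD r []))
        (fun r' hr' hq' m hm =>
          (PySem.Set.mem_update _ _ _).mpr (Or.inl (h r' (List.mem_cons_of_mem _ hr') hq' m hm)))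
    · have hqr : q r = false := by simpa using hq
      have hPr : ∀ m ∈ rtm.getD r [], m ∈ C := h r List.mem_cons_self hqr
      rw [List.filter_cons_of_neg hq]
      have h1 : (PySem.Set.ofList (rtm.getD r [])).filter (fun m => !decide (m ∈ C)) = [] := by
        rw [List.filter_eq_nil_iff]
        intro m hm
        have hmC : m ∈ C := hPr m (by simpa [PySem.Set.mem_ofList] using hm)
        simp [hmC]
      have h2 : (PySem.Set.ofList (proc.flatMap fun r => rtm.getD r [])).filter
            (fun m => !decide (m ∈ PySem.Set.update C (rtm.getD r [])))
          = (PySem.Set.ofList (proc.flatMap fun r => rtm.getD r [])).filter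
            (fun m => !decide (m ∈ C)) := by
        apply List.filter_congr
        intro m _
        by_cases hc : m ∈ C
        · simp [hc, PySem.Set.mem_update]
        · have hmp : m ∉ rtm.getD r [] := fun hmp => hc (hPr m hmp)
          simp [hc, hmp, PySem.Set.mem_update]
      rw [h1, List.nil_append, h2, ih C (fun r' hr' => h r' (List.mem_cons_of_mem _ hr'))]

-- every looked-up product is among the dict's stored values
lemma pv_getD_sub_values (rtm : PySem.Dict String (List String)) (r m : String)
    (h : m ∈ rtm.getD r []) : m ∈ rtm.values.flatten := by
  rw [PySem.Dict.getD_eq_get?_getD] at h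
  cases hq : rtm.get? r with
  | none => rw [hq] at h; simp at h
  | some v =>
    rw [hq] at h
    simp only [Option.getD_some] at h
    have hv : (r, v) ∈ rtm.items := PySem.Dict.mem_items_of_get?_eq_some rtm hq
    have hvv : v ∈ rtm.values := by
      simp only [PySem.Dict.values, List.mem_map]
      exact ⟨(r, v), hv, rfl⟩
    exact List.mem_flatten.mpr ⟨v, hvv, h⟩

-- a nodup list included in another is no longer than it
lemma pv_nodup_len {l₁ l₂ : List String} (hnd : l₁.Nodup) (hsub : l₁ ⊆ l₂) :
    l₁.length ≤ l₂.length := by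
  calc l₁.length = l₁.toFinset.card := (List.toFinset_card_of_nodup hnd).symm
    _ ≤ l₂.toFinset.card := Finset.card_le_card (fun a ha => by
        simp only [List.mem_toFinset] at ha ⊢; exact hsub ha)
    _ ≤ l₂.length := l₂.toFinset_card_le

-- after absorbing a fresh nodup frontier F ⊆ U into mets, the count of unknown
-- occurrences of U drops by at least |F|
lemma pv_cnt_drop (U metsA F : List String) (hFnd : F.Nodup)
    (hdisj : ∀ m ∈ F, m ∉ metsA) (hFU : ∀ m ∈ F, m ∈ U) :
    (U.filter (fun m => !decide (m ∈ PySem.Set.update metsA F))).length + F.length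
      ≤ (U.filter (fun m => !decide (m ∈ metsA))).length := by
  set X := U.filter (fun m => !decide (m ∈ metsA)) with hX
  have hsplit : (X.filter (fun m => decide (m ∈ F))).length
      + (X.filter (fun m => !decide (m ∈ F))).length = X.length := by
    simpa using (List.length_eq_length_filter_add (l := X) (fun m => decide (m ∈ F))).symm
  have h1 : X.filter (fun m => !decide (m ∈ F))
      = U.filter (fun m => !decide (m ∈ PySem.Set.update metsA F)) := by
    rw [hX, List.filter_filter]
    apply List.filter_congr
    intro m _
    by_cases hA : m ∈ metsA <;> by_cases hF : m ∈ F <;>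
      simp [hA, hF, PySem.Set.mem_update]
  have h2 : F.length ≤ (X.filter (fun m => decide (m ∈ F))).length := by
    apply pv_nodup_len hFnd
    intro f hf
    refine List.mem_filter.mpr ⟨?_, by simp [hf]⟩
    exact List.mem_filter.mpr ⟨hFU f hf, by simp [hdisj f hf]⟩
  rw [h1] at hsplit
  omega

-- the two loops stay in lock-step: A's level loop equals B's pending-list loop
lemma pvLoop_eq (mtr rtm : PySem.Dict String (List String)) (E U : List String)
    (hU : ∀ r m, m ∈ rtm.getD r [] → m ∈ U) :
    ∀ (fuelA : Nat) (metsA F seen : List String) (fuelP : Nat),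
      F.Nodup → metsA.Nodup → (∀ m ∈ F, m ∉ metsA) → (∀ m ∈ F, m ∈ U) →
      (∀ r ∈ E, r ∈ seen) →
      (∀ r ∈ seen, r ∉ E → ∀ m ∈ rtm.getD r [], m ∈ PySem.Set.update metsA F) →
      (U.filter (fun m => !decide (m ∈ metsA))).length < fuelA →
      (U.filter (fun m => !decide (m ∈ metsA))).length < fuelP →
      pvLoopA mtr rtm E fuelA metsA F
        = pvLoopP mtr rtm fuelP (PySem.Set.update metsA F) seen F := by
  intro fuelA
  induction fuelA with
  | zero => intro metsA F seen fuelP _ _ _ _ _ _ hfuel _; exact absurd hfuel (Nat.not_lt_zero _)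
  | succ fuelA ih =>
    intro metsA F seen fuelP hFnd hMnd hdisj hFU hseenE hprod hfuelA hfuelP
    by_cases hF : F = []
    · subst hF
      cases fuelP with
      | zero => simp [pvLoopA, pvLoopP, PySem.Set.update_nil]
      | succ fuelP => simp [pvLoopA, pvLoopP, PySem.Set.update_nil]
    · -- advance B by |F| single-metabolite steps
      have hcnt := pv_cnt_drop U metsA F hFnd hdisj hFU
      have hFlen : F.length ≤ (U.filter (fun m => !decide (m ∈ metsA))).length := by omega
      have hfuelPsplit : fuelP = F.length + (fuelP - F.length) := by omega
      have hchunk := pvLoopP_chunk mtr rtm F [] (fuelP - F.length)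
        (PySem.Set.update metsA F) seen
      simp only [List.append_nil, List.nil_append] at hchunk
      rw [hfuelPsplit, hchunk]
      -- advance A by one level
      simp only [pvLoopA]
      rw [if_neg hF]
      rw [pv_fold_ofList, pv_diff_eq, pv_fold_ofList, pv_diff_eq, pvFrontFold]
      -- abbreviations
      set R : String → List String := fun met => mtr.getD met [] with hR
      set P : String → List String := fun r => rtm.getD r [] with hP
      set flat := F.flatMap R with hflat
      set mets' := PySem.Set.update metsA F with hmets'
      set newRxns := (PySem.Set.ofList flat).filter (fun r => !decide (r ∈ E)) with hnew
      set procB := (PySem.Set.ofList flat).filter (fun r => !decide (r ∈ seen)) with hproc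
      set FA := (PySem.Set.ofList (newRxns.flatMap P)).filter (fun m => !decide (m ∈ mets'))
        with hFA
      -- B processes exactly A's fresh reactions minus the already-seen ones
      have e1 : procB = newRxns.filter (fun r => !decide (r ∈ seen)) := by
        rw [hproc, hnew, List.filter_filter]
        apply List.filter_congr
        intro r _
        by_cases hs : r ∈ seen
        · simp [hs]
        · simp [hs, show r ∉ E from fun hE => hs (hseenE r hE)]
      -- the already-seen reactions contribute no new metabolite
      have hdropHyp : ∀ r ∈ newRxns, (fun r => !decide (r ∈ seen)) r = false →
          ∀ m ∈ P r, m ∈ mets' := by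
        intro r hr hqr m hm
        have hrseen : r ∈ seen := by simpa using hqr
        have hrE : r ∉ E := by
          have := List.of_mem_filter hr
          simpa using this
        exact hprod r hrseen hrE m hm
      have e2 : (PySem.Set.ofList (procB.flatMap P)).filter (fun m => !decide (m ∈ mets'))
          = FA := by
        rw [e1, hFA]
        exact (pv_drop rtm newRxns _ mets' hdropHyp).symm
      -- the next B metabolite set is A's next metabolite set
      have hFAnodup : FA.Nodup := List.Nodup.filter _ (PySem.Set.nodup_ofList _)
      have hFAdisj : ∀ m ∈ FA, m ∉ mets' := by
        intro m hm
        have := List.of_mem_filter hm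
        simpa using this
      have e3 : PySem.Set.update mets' (procB.flatMap P) = PySem.Set.update mets' FA := by
        rw [PySem.Set.update_eq_append_filter, PySem.Set.update_eq_append_filter]
        congr 1
        have hl : (PySem.Set.ofList (procB.flatMap P)).filter
            (fun y => !PySem.Set.contains mets' y) = (PySem.Set.ofList (procB.flatMap P)).filter
            (fun m => !decide (m ∈ mets')) := by
          apply List.filter_congr
          intro y _
          simp [PySem.Set.contains_eq_listContains, List.contains_eq_mem]
        rw [hl, e2]
        have hr1 : PySem.Set.ofList FA = FA := PySem.Set.ofList_eq_self_of_nodup _ hFAnodup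
        rw [hr1]
        rw [List.filter_eq_self.mpr]
        intro a ha
        simp [PySem.Set.contains_eq_listContains, List.contains_eq_mem, hFAdisj a ha]
      rw [e2, e3]
      -- apply the induction hypothesis at the next level
      have hFAU : ∀ m ∈ FA, m ∈ U := by
        intro m hm
        have hm2 : m ∈ PySem.Set.ofList (newRxns.flatMap P) := List.mem_of_mem_filter hm
        have hm3 : m ∈ newRxns.flatMap P := by simpa [PySem.Set.mem_ofList] using hm2
        obtain ⟨r, _, hmr⟩ := List.mem_flatMap.mp hm3
        exact hU r m hmr
      have hseenE' : ∀ r ∈ E, r ∈ PySem.Set.update seen flat := by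
        intro r hr
        exact (PySem.Set.mem_update _ _ _).mpr (Or.inl (hseenE r hr))
      have hprod' : ∀ r ∈ PySem.Set.update seen flat, r ∉ E →
          ∀ m ∈ rtm.getD r [], m ∈ PySem.Set.update mets' FA := by
        intro r hr hrE m hm
        rw [← e3]
        rw [PySem.Set.mem_update]
        rcases (PySem.Set.mem_update _ _ _).mp hr with hrs | hrf
        · exact Or.inl (hprod r hrs hrE m hm)
        · by_cases hrseen : r ∈ seen
          · exact Or.inl (hprod r hrseen hrE m hm)
          · have hrp : r ∈ procB := by
              rw [hproc]
              refine List.mem_filter.mpr ⟨?_, by simp [hrseen]⟩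
              simp [PySem.Set.mem_ofList, hrf]
            exact Or.inr (List.mem_flatMap.mpr ⟨r, hrp, hm⟩)
      have hMnd' : mets'.Nodup := PySem.Set.nodup_update _ _ hMnd
      have hcntFA := pv_cnt_drop U mets' FA hFAnodup hFAdisj hFAU
      have hstrict : (U.filter (fun m => !decide (m ∈ mets'))).length
          < (U.filter (fun m => !decide (m ∈ metsA))).length := by
        obtain ⟨f, Ft, rfl⟩ : ∃ f Ft, F = f :: Ft := by
          cases F with
          | nil => exact absurd rfl hF
          | cons f Ft => exact ⟨f, Ft, rfl⟩
        have : (f :: Ft).length ≥ 1 := by simp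
        omega
      have hfuelA' : (U.filter (fun m => !decide (m ∈ mets'))).length < fuelA := by omega
      have hfuelP' : (U.filter (fun m => !decide (m ∈ mets'))).length
          < fuelP - F.length := by omega
      exact ih mets' FA (PySem.Set.update seen flat) (fuelP - F.length) hFAnodup hMnd'
        hFAdisj hFAU hseenE' hprod' hfuelA' hfuelP'

-- B's initial dedup pass over start, with a general accumulator
lemma pvInitFoldAux (start : List String) :
    ∀ (s : PySem.Set String) (next : List String),
      start.foldl (fun st m => if m ∈ st.1 then st else (PySem.Set.add st.1 m, st.2 ++ [m]))
          (s, next)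
        = (PySem.Set.update s start,
           next ++ (PySem.Set.ofList start).filter (fun m => !decide (m ∈ s))) := by
  induction start with
  | nil =>
    intro s next
    simp [PySem.Set.update_nil, PySem.Set.ofList, PySem.Set.empty]
  | cons m L ih =>
    intro s next
    rw [List.foldl_cons]
    by_cases hm : m ∈ s
    · rw [if_pos hm, ih, PySem.Set.update_cons, PySem.Set.add_of_mem hm,
        pv_filter_cons_mem _ _ _ hm]
    · rw [if_neg hm]
      simp only [PySem.Set.add_of_not_mem hm]
      rw [ih, PySem.Set.update_cons, PySem.Set.add_of_not_mem hm, pv_filter_cons_not_mem _ _ _ hm]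
      simp [List.append_assoc]

lemma pvInitFold (start : List String) :
    start.foldl (fun st m => if m ∈ st.1 then st else (PySem.Set.add st.1 m, st.2 ++ [m]))
        ((PySem.Set.empty : PySem.Set String), ([] : List String))
      = (PySem.Set.ofList start, PySem.Set.ofList start) := by
  rw [pvInitFoldAux]
  have h1 : PySem.Set.update (PySem.Set.empty) start = PySem.Set.ofList start := rfl
  have h2 : (PySem.Set.ofList start).filter
      (fun m => !decide (m ∈ (PySem.Set.empty : PySem.Set String))) = PySem.Set.ofList start := by
    apply List.filter_eq_self.mpr
    intro a _
    simp [PySem.Set.empty]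
  rw [h1, h2, List.nil_append]

-- ===== VERDICT (by name: the statement is the Claim_ definition above) =====
theorem trace_possible_reactions_spec : Claim_equal_trace_possible_reactions := by
  intro start met_to_rxn rxn_to_met excluded_rxns _
  unfold Spec_trace_possible_reactions trace_possible_reactions trace_possible_reactions_alt
  simp only [pvInitFold]
  rw [show (0 : Nat) = ([] : List String).length from rfl,
    show PySem.Set.ofList start = ([] : List String) ++ PySem.Set.ofList start from rfl,
    pvBLoop_eq_P]
  have hU : ∀ r m, m ∈ (PySem.Dict.ofList rxn_to_met).getD r [] →
      m ∈ start ++ (PySem.Dict.ofList rxn_to_met).values.flatten := by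
    intro r m hm
    exact List.mem_append_right _ (pv_getD_sub_values _ r m hm)
  have hcnt : ((start ++ (PySem.Dict.ofList rxn_to_met).values.flatten).filter
      (fun m => !decide (m ∈ ([] : List String)))).length
      < start.length + (PySem.Dict.ofList rxn_to_met).values.flatten.length + 1 := by
    have : (start ++ (PySem.Dict.ofList rxn_to_met).values.flatten).filter
        (fun m => !decide (m ∈ ([] : List String)))
        = start ++ (PySem.Dict.ofList rxn_to_met).values.flatten := by
      apply List.filter_eq_self.mpr
      intro a _
      simp
    rw [this, List.length_append]
    omega
  have h := pvLoop_eq (PySem.Dict.ofList met_to_rxn) (PySem.Dict.ofList rxn_to_met)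
    (PySem.Set.ofList excluded_rxns) (start ++ (PySem.Dict.ofList rxn_to_met).values.flatten) hU
    (start.length + (PySem.Dict.ofList rxn_to_met).values.flatten.length + 1)
    [] (PySem.Set.ofList start) (PySem.Set.ofList excluded_rxns)
    (start.length + (PySem.Dict.ofList rxn_to_met).values.flatten.length + 1)
    (PySem.Set.nodup_ofList _) List.nodup_nil
    (fun m _ h => absurd h (List.not_mem_nil))
    (fun m hm => List.mem_append_left _ (by simpa [PySem.Set.mem_ofList] using hm))
    (fun r hr => hr)
    (fun r hr hrE => absurd hr hrE)
    hcnt hcnt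
  have hupd : PySem.Set.update ([] : List String) (PySem.Set.ofList start)
      = PySem.Set.ofList start := by
    rw [show PySem.Set.update ([] : List String) (PySem.Set.ofList start)
        = PySem.Set.ofList (PySem.Set.ofList start) from rfl, PySem.Set.ofList_ofList]
  rw [hupd] at h
  exact h
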